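-- pv_equiv track=rewrite | github.com/hack3rlmao/DS-Lite-Security | validate_parameters.py | is_valid_fqdn
-- ===== SOURCE A (Python) =====
-- def is_valid_fqdn(fqdn):
--     """Returns True if the string is a valid FQDN (max 253 chars, labels max 63 chars)."""
--     if not fqdn or len(fqdn) > 253:
--         return False
--     if '.' not in fqdn:
--         return False
--     labels = fqdn.split('.')
--     for label in labels:
--         if not label or len(label) > 63:
--             return False
--         if not label[0].isalnum() or not label[-1].isalnum():
--             return False
--     return True
-- ===== SOURCE B (Python) =====
-- def is_valid_fqdn(fqdn):
--     """Single-pass char scan: validate each label as it ends instead of splitting."""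
--     if not fqdn or len(fqdn) > 253:
--         return False
--     saw_dot = False
--     start = None   # first char of the current label
--     count = 0      # length of the current label
--     prev = None    # previous character seen
--     for ch in fqdn:
--         if ch == '.':
--             if count == 0 or count > 63 or not start.isalnum() or not prev.isalnum():
--                 return False
--             saw_dot = True
--             start = None
--             count = 0
--         else:
--             if start is None:
--                 start = ch
--             count += 1
--         prev = ch
--     if not saw_dot:
--         return False
--     if count == 0 or count > 63 or not start.isalnum() or not prev.isalnum():
--         return False
--     return True
-- ===== Notes on version B (the rewrite author's own statement) =====
-- stated objective: alternative
-- what changed: Replaces the split-into-labels pass plus a loop over the label list with a single character scan that maintains the current label's length, first character and the previous character, validating each label as it ends.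
import Mathlib
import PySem

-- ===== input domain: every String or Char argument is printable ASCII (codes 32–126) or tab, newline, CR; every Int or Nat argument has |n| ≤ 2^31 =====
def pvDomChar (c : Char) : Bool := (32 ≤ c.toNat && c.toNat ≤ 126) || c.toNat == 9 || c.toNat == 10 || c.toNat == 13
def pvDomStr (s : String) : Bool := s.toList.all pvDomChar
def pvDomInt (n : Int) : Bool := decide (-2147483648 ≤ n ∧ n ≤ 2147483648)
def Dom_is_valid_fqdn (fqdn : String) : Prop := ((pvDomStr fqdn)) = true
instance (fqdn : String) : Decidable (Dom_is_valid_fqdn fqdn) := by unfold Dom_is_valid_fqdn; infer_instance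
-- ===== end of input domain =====

-- B replaces the split-into-labels pass plus label loop by a single character scan with label state; alternative decomposition, same cost.

-- `x.isalnum()` on an Option-typed char (the `none` branch is unreachable in both ports:
-- it is only evaluated when the label/count is nonzero, so the char is present)
def optAlnum : Option Char → Bool
  | some c => PySem.Chars.isalnum c
  | none => false

-- ===== PORT A =====
-- the for-loop over the split-off labels with its early returns
def loopA : List (List Char) → Bool
  | [] => true
  | label :: rest =>
      if label.length = 0 || 63 < label.length then false
      else if !(optAlnum (PySem.List.pyGet? label 0)) || !(optAlnum (PySem.List.pyGet? label (-1))) then false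
      else loopA rest

def is_valid_fqdn (fqdn : String) : Bool :=
  let cs := fqdn.toList
  if cs.length = 0 || 253 < cs.length then false
  else if !(PySem.Str.isIn "." fqdn) then false
  else loopA (PySem.Chars.splitOn cs ['.'])

-- ===== PORT B =====
-- the scan loop of Source B: sawDot / start (first char of current label) / count (its length) / prev
def scanLoop : List Char → Bool → Option Char → Nat → Option Char → Bool
  | [], sawDot, start, count, prev =>
      if !sawDot then false
      else if count = 0 || 63 < count || !(optAlnum start) || !(optAlnum prev) then false
      else true
  | ch :: rest, sawDot, start, count, prev =>
      if ch = '.' then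
        if count = 0 || 63 < count || !(optAlnum start) || !(optAlnum prev) then false
        else scanLoop rest true none 0 (some ch)
      else
        scanLoop rest sawDot (match start with | none => some ch | some a => some a) (count + 1) (some ch)

def is_valid_fqdn_alt (fqdn : String) : Bool :=
  let cs := fqdn.toList
  if cs.length = 0 || 253 < cs.length then false
  else scanLoop cs false none 0 none

-- ===== PRECONDITION & SPEC =====
def Spec_is_valid_fqdn (fqdn : String) (out : Bool) : Prop := out = is_valid_fqdn_alt fqdn
instance (fqdn : String) (out : Bool) : Decidable (Spec_is_valid_fqdn fqdn out) := by unfold Spec_is_valid_fqdn; infer_instance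

-- ===== CLAIM (what is proved, stated in full; the proofs are below) =====
def Claim_equal_is_valid_fqdn : Prop := ∀ (fqdn : String), Dom_is_valid_fqdn fqdn → Spec_is_valid_fqdn fqdn (is_valid_fqdn fqdn)

-- ===== LEMMAS AND PROOFS =====

-- abstract description of splitting on dots on a char list, with `pre` the pending partial label
def pvLabels (pre : List Char) : List Char → List (List Char)
  | [] => [pre]
  | c :: rest => if c = '.' then pre :: pvLabels [] rest else pvLabels (pre ++ [c]) rest

theorem pvSplitOn_go_eq (fuel : Nat) : ∀ (l cur : List Char) (acc : List (List Char)),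
    l.length ≤ fuel →
    PySem.Chars.splitOn.go ['.'] fuel l cur acc = acc.reverse ++ pvLabels cur.reverse l := by
  induction fuel with
  | zero =>
      intro l cur acc h
      have : l = [] := List.eq_nil_of_length_eq_zero (Nat.le_zero.mp h)
      subst this
      simp [PySem.Chars.splitOn.go, pvLabels]
  | succ n ih =>
      intro l cur acc h
      match l with
      | [] => simp [PySem.Chars.splitOn.go, pvLabels]
      | c :: rest =>
          simp only [PySem.Chars.splitOn.go]
          by_cases hc : c = '.'
          · subst hc
            rw [if_pos (by simp [List.isPrefixOf])]
            rw [ih _ _ _ (by simpa using Nat.le_of_succ_le_succ h)]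
            simp [pvLabels]
          · rw [if_neg (by simp only [List.isPrefixOf, Bool.and_true, beq_iff_eq]; exact fun hh => hc hh.symm)]
            rw [ih rest (c :: cur) acc (by simpa using Nat.le_of_succ_le_succ h)]
            simp [pvLabels, hc]

theorem pvSplitOn_eq (cs : List Char) : PySem.Chars.splitOn cs ['.'] = pvLabels [] cs := by
  unfold PySem.Chars.splitOn
  rw [pvSplitOn_go_eq (cs.length + 1) cs [] [] (Nat.le_succ _)]
  simp

theorem pvPyGet_zero (l : List Char) : PySem.List.pyGet? l 0 = l.head? := by
  simp [PySem.List.pyGet?, PySem.List.pyIdx?]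
  cases l <;> simp

theorem pvPyGet_neg_one (l : List Char) : PySem.List.pyGet? l (-1) = l.getLast? := by
  cases l with
  | nil => simp [PySem.List.pyGet?, PySem.List.pyIdx?]
  | cons a t =>
      simp [PySem.List.pyGet?, PySem.List.pyIdx?]
      simp [List.getLast?_eq_getElem?]

-- the label check of A's loop, phrased on the whole label (as B checks it)
theorem pvLoopA_cons (label : List Char) (rest : List (List Char)) :
    loopA (label :: rest) =
      if label.length = 0 || 63 < label.length
          || !(optAlnum label.head?) || !(optAlnum label.getLast?) then false
      else loopA rest := by
  simp only [loopA, pvPyGet_zero, pvPyGet_neg_one]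
  cases hA : decide (label.length = 0) <;> cases hB : decide (63 < label.length) <;>
    cases hC : optAlnum label.head? <;> cases hD : optAlnum label.getLast? <;>
      simp_all

-- main invariant: the scan from a mid-label state equals A's loop on the remaining labels,
-- guarded by "a dot was already seen or will be seen"
theorem pvScan_eq (l : List Char) : ∀ (pre : List Char) (prev0 : Option Char) (sawDot : Bool),
    (pre = [] → optAlnum prev0 = false) →
    (pre ≠ [] → prev0 = pre.getLast?) →
    scanLoop l sawDot pre.head? pre.length prev0 =
      ((sawDot || decide ('.' ∈ l)) && loopA (pvLabels pre l)) := by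
  induction l with
  | nil =>
      intro pre prev0 sawDot h0 h1
      simp only [pvLabels, pvLoopA_cons, scanLoop]
      cases pre with
      | nil =>
          have h0' := h0 rfl
          cases sawDot <;> simp [h0']
      | cons a t =>
          rw [h1 (by simp)]
          cases sawDot <;> simp [loopA]
  | cons ch rest ih =>
      intro pre prev0 sawDot h0 h1
      by_cases hc : ch = '.'
      · subst hc
        simp only [scanLoop, pvLabels]
        simp only [if_true]
        rw [pvLoopA_cons]
        have hEq : (decide (pre.length = 0) || decide (63 < pre.length)
            || !(optAlnum pre.head?) || !(optAlnum prev0))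
            = (decide (pre.length = 0) || decide (63 < pre.length)
            || !(optAlnum pre.head?) || !(optAlnum pre.getLast?)) := by
          cases pre with
          | nil => simp
          | cons a t => rw [h1 (by simp)]
        rw [hEq]
        have hdotAl : optAlnum (some '.') = false := by decide
        by_cases hbad : (decide (pre.length = 0) || decide (63 < pre.length)
            || !(optAlnum pre.head?) || !(optAlnum pre.getLast?)) = true
        · rw [if_pos hbad, if_pos hbad]
          simp
        · rw [if_neg hbad, if_neg hbad]
          have hrec := ih [] (some '.') true (fun _ => hdotAl) (fun h => absurd rfl h)
          simp only [List.head?_nil, List.length_nil, Bool.true_or, Bool.true_and] at hrec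
          rw [hrec]
          simp
      · simp only [scanLoop, pvLabels, if_neg hc]
        have hstart : (match pre.head? with | none => some ch | some a => some a)
            = (pre ++ [ch]).head? := by cases pre <;> simp
        have hlen : pre.length + 1 = (pre ++ [ch]).length := by simp
        have hlast : some ch = (pre ++ [ch]).getLast? := by simp
        rw [hstart, hlen, hlast]
        rw [ih (pre ++ [ch]) ((pre ++ [ch]).getLast?) sawDot (by simp) (fun _ => rfl)]
        have hmem : ('.' ∈ ch :: rest) ↔ ('.' ∈ rest) := by
          simp only [List.mem_cons]
          constructor
          · rintro (h | h)
            · exact absurd h.symm hc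
            · exact h
          · exact Or.inr
        simp [hmem]

theorem pvDotMem (fqdn : String) :
    PySem.Str.isIn "." fqdn = decide ('.' ∈ fqdn.toList) := by
  have hdot : ".".toList = ['.'] := rfl
  by_cases h : '.' ∈ fqdn.toList
  · rw [(PySem.Str.isIn_iff_infix "." fqdn).mpr
      (hdot ▸ (List.singleton_infix_iff _ _).mpr h), decide_eq_true h]
  · rw [decide_eq_false h, ← Bool.not_eq_true, PySem.Str.isIn_iff_infix, hdot]
    exact fun hin => h ((List.singleton_infix_iff _ _).mp hin)

-- ===== VERDICT (by name: the statement is the Claim_ definition above) =====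
theorem is_valid_fqdn_spec : Claim_equal_is_valid_fqdn := by
  intro fqdn _
  unfold Spec_is_valid_fqdn is_valid_fqdn is_valid_fqdn_alt
  by_cases hlen : (decide (fqdn.toList.length = 0) || decide (253 < fqdn.toList.length)) = true
  · rw [if_pos hlen, if_pos hlen]
  · rw [if_neg hlen, if_neg hlen]
    have hscan := pvScan_eq fqdn.toList [] none false (fun _ => rfl) (fun h => absurd rfl h)
    simp only [List.head?_nil, List.length_nil, Bool.false_or] at hscan
    rw [hscan, pvSplitOn_eq, pvDotMem]
    by_cases hm : '.' ∈ fqdn.toList <;> simp [hm]
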